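-- pv_equiv track=rewrite | github.com/brainnotincluded/cpm | barcode.py | to_position
-- ===== SOURCE A (Python) =====
-- def to_position(bs):
--     s = ''
--     d = {1:'a',
--          2:'b',
--          3:'c',
--          4:'d',
--          5:'e',
--          6:'f',
--          7:'g'
--          }
--     m = 0
--     for i,j in enumerate(bs):
--         m += j*(2**i)
--     assert 10 <= m < 100, "Bad barcode:{}".format(m)
--     high = m // 10
--     low = m % 10
--     s += d[high]
--     s += str(low)
--     return s
-- ===== SOURCE B (Python) =====
-- def to_position(bs):
--     def value(rest):
--         if not rest:
--             return 0
--         return rest[0] + 2 * value(rest[1:])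
--     m = value(bs)
--     assert 10 <= m < 100, "Bad barcode:{}".format(m)
--     table = [c + str(n) for c in 'abcdefg' for n in range(10)]
--     return table[m - 10]
-- ===== Notes on version B (the rewrite author's own statement) =====
-- stated objective: alternative
-- what changed: Decodes the bits by structural recursion (b + 2*value(rest)) instead of an enumerate loop with explicit powers, and replaces the //, % arithmetic plus letter dict with a single lookup in a precomputed 70-entry table of all position strings.
import Mathlib
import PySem

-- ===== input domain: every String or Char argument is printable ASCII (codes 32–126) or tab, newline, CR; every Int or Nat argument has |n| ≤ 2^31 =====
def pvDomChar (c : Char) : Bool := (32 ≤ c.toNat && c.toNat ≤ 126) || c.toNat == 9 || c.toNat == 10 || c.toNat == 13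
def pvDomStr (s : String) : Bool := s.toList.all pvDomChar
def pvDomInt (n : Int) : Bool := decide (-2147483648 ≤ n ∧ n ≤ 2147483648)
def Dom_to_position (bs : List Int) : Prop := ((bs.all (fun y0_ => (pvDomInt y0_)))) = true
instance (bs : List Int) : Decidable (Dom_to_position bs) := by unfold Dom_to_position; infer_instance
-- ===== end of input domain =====

-- B decodes the bits by structural recursion instead of A's enumerate power-sum loop, and
-- replaces A's //,% arithmetic + letter dict with one lookup in a precomputed 70-entry table.

-- ===== PORT A =====
def to_position (bs : List Int) : String :=
  let s : String := ""
  let d : PySem.Dict Int String :=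
    PySem.Dict.ofList [(1, "a"), (2, "b"), (3, "c"), (4, "d"), (5, "e"), (6, "f"), (7, "g")]
  let m : Int := (PySem.List.enumerate bs).foldl (fun m ij => m + ij.2 * 2 ^ ij.1.toNat) 0
  if 10 ≤ m ∧ m < 100 then
    let high := PySem.Int.floordiv m 10
    let low := PySem.Int.mod m 10
    match d.get? high with
    | some c => (s ++ c) ++ PySem.Int.toStr low
    | none => ""   -- KeyError (high ∈ {8, 9}); excluded by Pre_
  else ""          -- AssertionError; excluded by Pre_

-- ===== PORT B =====
-- recursive helper 'value' of Source B
def pvValue (bs : List Int) : Int :=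
  match bs with
  | [] => 0
  | b :: rest => b + 2 * pvValue rest

def to_position_alt (bs : List Int) : String :=
  let m := pvValue bs
  if 10 ≤ m ∧ m < 100 then
    let table : List String :=
      ("abcdefg".toList).flatMap (fun c =>
        (PySem.List.pyRange 0 10 1).map (fun n => String.ofList [c] ++ PySem.Int.toStr n))
    match PySem.List.pyGet? table (m - 10) with
    | some r => r
    | none => ""   -- IndexError (m ≥ 80); excluded by Pre_
  else ""          -- AssertionError; excluded by Pre_

-- ===== PRECONDITION & SPEC =====
-- Pre_ excludes exactly the inputs where A raises: decoded value < 10 or ≥ 100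
-- (AssertionError), and value in 80..99 (KeyError: the dict only maps 1..7).
def Pre_to_position (bs : List Int) : Prop := 10 ≤ pvValue bs ∧ pvValue bs < 80
instance (bs : List Int) : Decidable (Pre_to_position bs) := by unfold Pre_to_position; infer_instance
def pvWitness_to_position : List Int := [1, 1, 0, 0, 1]

def Spec_to_position (bs : List Int) (out : String) : Prop := out = to_position_alt bs
instance (bs : List Int) (out : String) : Decidable (Spec_to_position bs out) := by unfold Spec_to_position; infer_instance

-- ===== CLAIM =====
def Claim_equal_to_position : Prop := ∀ (bs : List Int), Dom_to_position bs → Pre_to_position bs → Spec_to_position bs (to_position bs)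

-- ===== LEMMAS AND PROOFS =====

lemma a_sum_aux (bs : List Int) : ∀ (k : Nat) (acc : Int),
    (PySem.List.enumerate bs (k : Int)).foldl (fun m ij => m + ij.2 * 2 ^ ij.1.toNat) acc
      = acc + 2 ^ k * pvValue bs := by
  induction bs with
  | nil => intro k acc; simp [PySem.List.enumerate_nil, pvValue]
  | cons b bs ih =>
    intro k acc
    rw [PySem.List.enumerate_cons]
    have hcast : (k : Int) + 1 = ((k + 1 : Nat) : Int) := by push_cast; ring
    simp only [List.foldl_cons, hcast, ih (k + 1), Int.toNat_natCast, pvValue]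
    ring

-- A's enumerate power-sum computes the same value as B's recursion
lemma a_sum_eq_value (bs : List Int) :
    (PySem.List.enumerate bs).foldl (fun m ij => m + ij.2 * 2 ^ ij.1.toNat) 0 = pvValue bs := by
  simpa using a_sum_aux bs 0 0

-- for m in 10..79, A's dict lookup + divmod formatting equals B's table lookup
lemma branches_eq (m : Int) (h1 : 10 ≤ m) (h2 : m < 80) :
    (match (PySem.Dict.ofList
        [((1:Int), "a"), (2, "b"), (3, "c"), (4, "d"), (5, "e"), (6, "f"), (7, "g")]).get?
        (PySem.Int.floordiv m 10) with
      | some c => ("" ++ c) ++ PySem.Int.toStr (PySem.Int.mod m 10)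
      | none => "")
    = (match PySem.List.pyGet?
        (("abcdefg".toList).flatMap (fun c =>
          (PySem.List.pyRange 0 10 1).map (fun n => String.ofList [c] ++ PySem.Int.toStr n)))
        (m - 10) with
      | some r => r
      | none => "") := by
  interval_cases m <;> rfl

-- ===== VERDICT =====
theorem to_position_spec : Claim_equal_to_position := by
  intro bs _ hpre
  obtain ⟨h1, h2⟩ := hpre
  unfold Spec_to_position to_position to_position_alt
  rw [a_sum_eq_value]
  rw [if_pos (⟨h1, by omega⟩ : (10:Int) ≤ pvValue bs ∧ pvValue bs < 100),
      if_pos (⟨h1, by omega⟩ : (10:Int) ≤ pvValue bs ∧ pvValue bs < 100)]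
  exact branches_eq (pvValue bs) h1 h2
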